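-- pv_equiv track=rewrite | github.com/Boscoaran/Criptografia | descifrador.py | buscar_rr
-- ===== SOURCE A (Python) =====
-- def buscar_rr(txt):
--     list_txt=list(txt)
--     c1=''
--     c2=0
--     doble_r=False
--     while c2<len(list_txt) and not doble_r:
--         if list_txt[c2]==c1 and ord(c1)<97:
--             doble_r=True
--             desc=c1
--             c2=len(list_txt)
--             return desc
--         else:
--             c1=list_txt[c2]
--             c2=c2+1
-- ===== SOURCE B (Python) =====
-- def buscar_rr(txt):
--     best_i = -1
--     best_c = None
--     for c in set(txt):
--         if ord(c) < 97:
--             i = txt.find(c + c)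
--             if i != -1 and (best_i == -1 or i < best_i):
--                 best_i, best_c = i, c
--     return best_c
-- ===== Notes on version B (the rewrite author's own statement) =====
-- stated objective: faster
-- what changed: Instead of A's character-by-character stateful while loop over the text, B iterates over the distinct characters with code < 97 (set(txt)) and locates the doubled substring c+c with str.find, returning the character with the leftmost hit.
import Mathlib
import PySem

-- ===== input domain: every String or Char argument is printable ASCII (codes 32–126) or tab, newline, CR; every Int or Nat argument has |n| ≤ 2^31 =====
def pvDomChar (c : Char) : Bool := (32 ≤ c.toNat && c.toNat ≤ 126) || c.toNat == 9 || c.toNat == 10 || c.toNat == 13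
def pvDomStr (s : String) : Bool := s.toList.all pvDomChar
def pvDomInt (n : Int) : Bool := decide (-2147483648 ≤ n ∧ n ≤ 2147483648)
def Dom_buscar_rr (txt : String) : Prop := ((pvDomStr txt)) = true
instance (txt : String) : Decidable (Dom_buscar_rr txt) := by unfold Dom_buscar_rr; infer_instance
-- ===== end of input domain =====

-- B replaces A's character-by-character while loop by a search over candidate characters:
-- for each distinct char c of code < 97 it finds the doubled substring c+c with str.find
-- and keeps the leftmost hit (measured faster: C-level substring search); same values everywhere.

-- ===== PORT A =====
-- A's while loop: c1 holds the previous character as a 1-char string ('' initially);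
-- 'list_txt[c2]==c1 and ord(c1)<97' short-circuits, so ord('') is never evaluated:
-- when c1 = "" the equality with a 1-char string is False. We transliterate the
-- condition with the same short-circuit shape (equality first).
def buscarLoopA : List Char → String → Option String
  | [], _ => none
  | c :: rest, c1 =>
      if String.singleton c = c1 ∧ (c1.toList.headD ' ').toNat < 97 then
        some c1
      else
        buscarLoopA rest (String.singleton c)

def buscar_rr (txt : String) : Option String := buscarLoopA txt.toList ""

-- ===== PORT B =====
-- fold over set(txt) with state (best_i, best_c); txt.find(c+c) is PySem.Chars.find on
-- the code points (exact). The fold's result does not depend on the set's iteration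
-- order: ties are impossible, the winning index determines the character.
def buscarStepB (l : List Char) (st : Int × Option Char) (c : Char) : Int × Option Char :=
  if c.toNat < 97 then
    if PySem.Chars.find l [c, c] ≠ -1 ∧ (st.1 = -1 ∨ PySem.Chars.find l [c, c] < st.1) then
      (PySem.Chars.find l [c, c], some c)
    else st
  else st

def buscar_rr_alt (txt : String) : Option String :=
  ((PySem.Set.ofList txt.toList).foldl (buscarStepB txt.toList) (-1, none)).2.map
    String.singleton

-- ===== PRECONDITION & SPEC =====
def Spec_buscar_rr (txt : String) (out : Option String) : Prop := out = buscar_rr_alt txt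
instance (txt : String) (out : Option String) : Decidable (Spec_buscar_rr txt out) := by unfold Spec_buscar_rr; infer_instance

-- ===== CLAIM =====
def Claim_equal_buscar_rr : Prop := ∀ (txt : String), Dom_buscar_rr txt → Spec_buscar_rr txt (buscar_rr txt)

-- ===== LEMMAS AND PROOFS =====

-- an adjacent equal pair of character c with code < 97 sits at position j of l
def goodAt (l : List Char) (j : Nat) (c : Char) : Prop :=
  l[j]? = some c ∧ l[j + 1]? = some c ∧ c.toNat < 97

-- the candidate characters for which B's inner branch can fire
def Qc (l : List Char) (c : Char) : Prop :=
  c.toNat < 97 ∧ PySem.Chars.find l [c, c] ≠ -1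

-- the predicate of A's pairwise characterisation
def qPair (p : Char × Char) : Bool := decide (p.1 = p.2 ∧ p.1.toNat < 97)

theorem singleton_eq_singleton_iff (a b : Char) :
    String.singleton a = String.singleton b ↔ a = b := by
  constructor
  · intro h
    have := congrArg String.toList h
    simpa [String.singleton] using this
  · intro h; rw [h]

theorem loopA_eq_find (l : List Char) (c : Char) :
    buscarLoopA l (String.singleton c) =
      (((c :: l).zip l).find? qPair).map (fun p => String.singleton p.1) := by
  induction l generalizing c with
  | nil => simp [buscarLoopA]
  | cons d rest ih =>
      by_cases h : d = c ∧ c.toNat < 97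
      · simp [buscarLoopA, h.1, h.2, String.singleton, qPair]
      · have hcond : ¬ (String.singleton d = String.singleton c ∧
            ((String.singleton c).toList.headD ' ').toNat < 97) := by
          simpa [singleton_eq_singleton_iff, String.singleton] using h
        have hfind : ¬ (c = d ∧ c.toNat < 97) := by
          intro hcd; exact h ⟨hcd.1.symm, hcd.2⟩
        simp only [buscarLoopA, if_neg hcond, List.zip_cons_cons, List.find?, qPair,
          decide_eq_false hfind]
        exact ih d

theorem A_eq_findPair (txt : String) :
    buscar_rr txt =
      ((txt.toList.zip txt.toList.tail).find? qPair).map (fun p => String.singleton p.1) := by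
  unfold buscar_rr
  cases hl : txt.toList with
  | nil => simp [buscarLoopA]
  | cons c rest =>
      have hfirst : buscarLoopA (c :: rest) "" = buscarLoopA rest (String.singleton c) := by
        simp [buscarLoopA]
      rw [hfirst, loopA_eq_find]
      rfl

theorem goodAt_iff_zip (l : List Char) (j : Nat) (c : Char) :
    goodAt l j c ↔ (l.zip l.tail)[j]? = some (c, c) ∧ c.toNat < 97 := by
  simp only [goodAt, List.getElem?_zip_eq_some, List.getElem?_tail]
  tauto

theorem double_prefix_iff (xs : List Char) (c : Char) :
    [c, c] <+: xs ↔ xs[0]? = some c ∧ xs[1]? = some c := by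
  cases xs with
  | nil => simp
  | cons a t =>
    cases t with
    | nil => simp [List.cons_prefix_cons]
    | cons b u => simp [List.cons_prefix_cons]; tauto

theorem double_prefix_drop_iff (l : List Char) (j : Nat) (c : Char) :
    [c, c] <+: l.drop j ↔ l[j]? = some c ∧ l[j + 1]? = some c := by
  rw [double_prefix_iff]
  simp [List.getElem?_drop]

theorem Qc_iff (l : List Char) (c : Char) :
    Qc l c ↔ c.toNat < 97 ∧ ∃ j, goodAt l j c := by
  unfold Qc
  refine and_congr_right fun hc => ?_
  rw [PySem.Chars.find_ne_neg_one_iff, ← PySem.Chars.isIn_iff_infix,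
    ← PySem.Chars.exists_prefix_drop_iff_isIn]
  constructor
  · rintro ⟨j, hj⟩
    exact ⟨j, by rw [double_prefix_drop_iff] at hj; exact ⟨hj.1, hj.2, hc⟩⟩
  · rintro ⟨j, h1, h2, _⟩
    exact ⟨j, (double_prefix_drop_iff l j c).2 ⟨h1, h2⟩⟩

-- the fold invariant for B: state describes the minimum over the seen candidates
def invB (l seen : List Char) (st : Int × Option Char) : Prop :=
  (st = (-1, none) ∧ ∀ c ∈ seen, ¬ Qc l c) ∨
  (∃ c, st = (PySem.Chars.find l [c, c], some c) ∧ c ∈ seen ∧ Qc l c ∧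
    ∀ c' ∈ seen, Qc l c' → PySem.Chars.find l [c, c] ≤ PySem.Chars.find l [c', c'])

theorem invB_step (l seen : List Char) (st : Int × Option Char) (c : Char)
    (h : invB l seen st) : invB l (seen ++ [c]) (buscarStepB l st c) := by
  unfold buscarStepB
  by_cases hc : c.toNat < 97
  · simp only [if_pos hc]
    by_cases hf : PySem.Chars.find l [c, c] = -1
    · have hnq : ¬ Qc l c := fun hq => hq.2 hf
      have : ¬ (PySem.Chars.find l [c, c] ≠ -1 ∧
          (st.1 = -1 ∨ PySem.Chars.find l [c, c] < st.1)) := fun h' => h'.1 hf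
      rw [if_neg this]
      rcases h with ⟨he, hall⟩ | ⟨c0, he, hmem, hq0, hmin⟩
      · refine Or.inl ⟨he, ?_⟩
        intro x hx
        rcases List.mem_append.1 hx with hx | hx
        · exact hall x hx
        · rw [List.mem_singleton.1 hx]; exact hnq
      · refine Or.inr ⟨c0, he, List.mem_append_left _ hmem, hq0, ?_⟩
        intro c' hc' hq'
        rcases List.mem_append.1 hc' with hc' | hc'
        · exact hmin c' hc' hq'
        · exact absurd hq' ((List.mem_singleton.1 hc') ▸ hnq)
    · have hq : Qc l c := ⟨hc, hf⟩
      have hge : -1 ≤ PySem.Chars.find l [c, c] := PySem.Chars.neg_one_le_find l [c, c]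
      rcases h with ⟨he, hall⟩ | ⟨c0, he, hmem, hq0, hmin⟩
      · rw [he]
        simp only [ne_eq, hf, not_false_iff, true_and]
        rw [if_pos (Or.inl trivial)]
        refine Or.inr ⟨c, rfl, List.mem_append_right _ (List.mem_singleton.2 rfl), hq, ?_⟩
        intro c' hc' hq'
        rcases List.mem_append.1 hc' with hc' | hc'
        · exact absurd hq' (hall c' hc')
        · rw [List.mem_singleton.1 hc']
      · have hge0 : -1 ≤ PySem.Chars.find l [c0, c0] := PySem.Chars.neg_one_le_find l [c0, c0]
        rw [he]
        by_cases hlt : PySem.Chars.find l [c, c] < PySem.Chars.find l [c0, c0]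
        · rw [if_pos ⟨hf, Or.inr hlt⟩]
          refine Or.inr ⟨c, rfl, List.mem_append_right _ (List.mem_singleton.2 rfl), hq, ?_⟩
          intro c' hc' hq'
          rcases List.mem_append.1 hc' with hc' | hc'
          · exact le_of_lt (lt_of_lt_of_le hlt (hmin c' hc' hq'))
          · rw [List.mem_singleton.1 hc']
        · have hne0 : (PySem.Chars.find l [c0, c0]) ≠ -1 := hq0.2
          have : ¬ (PySem.Chars.find l [c, c] ≠ -1 ∧
              ((PySem.Chars.find l [c0, c0], some c0).1 = -1 ∨
                PySem.Chars.find l [c, c] < (PySem.Chars.find l [c0, c0], some c0).1)) := by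
            rintro ⟨_, h' | h'⟩
            · exact hne0 h'
            · exact hlt h'
          rw [if_neg this]
          refine Or.inr ⟨c0, rfl, List.mem_append_left _ hmem, hq0, ?_⟩
          intro c' hc' hq'
          rcases List.mem_append.1 hc' with hc' | hc'
          · exact hmin c' hc' hq'
          · rw [List.mem_singleton.1 hc']; exact le_of_not_gt hlt
  · simp only [if_neg hc]
    have hnq : ¬ Qc l c := fun hq => hc hq.1
    rcases h with ⟨he, hall⟩ | ⟨c0, he, hmem, hq0, hmin⟩
    · refine Or.inl ⟨he, ?_⟩
      intro x hx
      rcases List.mem_append.1 hx with hx | hx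
      · exact hall x hx
      · rw [List.mem_singleton.1 hx]; exact hnq
    · refine Or.inr ⟨c0, he, List.mem_append_left _ hmem, hq0, ?_⟩
      intro c' hc' hq'
      rcases List.mem_append.1 hc' with hc' | hc'
      · exact hmin c' hc' hq'
      · exact absurd hq' ((List.mem_singleton.1 hc') ▸ hnq)

theorem invB_fold (l : List Char) (cs : List Char) :
    ∀ seen st, invB l seen st → invB l (seen ++ cs) (cs.foldl (buscarStepB l) st) := by
  induction cs with
  | nil => intro seen st h; simpa using h
  | cons c rest ih =>
      intro seen st h
      have := ih (seen ++ [c]) (buscarStepB l st c) (invB_step l seen st c h)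
      simpa using this

theorem invB_final (l : List Char) :
    invB l (PySem.Set.ofList l) ((PySem.Set.ofList l).foldl (buscarStepB l) (-1, none)) := by
  have := invB_fold l (PySem.Set.ofList l) [] (-1, none) (Or.inl ⟨rfl, by simp⟩)
  simpa using this

-- both ports agree, for every string
theorem buscar_rr_eq (txt : String) : buscar_rr txt = buscar_rr_alt txt := by
  set l := txt.toList with hl
  have hA := A_eq_findPair txt
  have hinv := invB_final l
  unfold buscar_rr_alt
  rw [← hl] at *
  cases hF : (l.zip l.tail).find? qPair with
  | none =>
      -- no good pair at all: every candidate fails, B's fold stays at the start state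
      have hnone : ∀ c ∈ l, ¬ Qc l c := by
        intro c hcl hq
        rcases (Qc_iff l c).1 hq with ⟨hc, j, hj⟩
        have hz := (goodAt_iff_zip l j c).1 hj
        have hmem : (c, c) ∈ l.zip l.tail := List.mem_of_getElem? hz.1
        have := List.find?_eq_none.1 hF _ hmem
        exact this (by simp [qPair, hc])
      rcases hinv with ⟨he, _⟩ | ⟨c0, _, hmem, hq0, _⟩
      · rw [hA, hF, he]; rfl
      · exact absurd hq0 (hnone c0 ((PySem.Set.mem_ofList _ _).1 hmem))
  | some b =>
      obtain ⟨x, y⟩ := b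
      rcases List.find?_eq_some_iff_getElem.1 hF with ⟨hqb, i0, hi0, hzi, hprev⟩
      have hb : x = y ∧ x.toNat < 97 := by simpa [qPair] using hqb
      set c0 := x with hc0
      have hbeq : (x, y) = (c0, c0) := by rw [hc0, ← hb.1]
      have hgood : goodAt l i0 c0 := by
        rw [goodAt_iff_zip]
        refine ⟨?_, hb.2⟩
        rw [List.getElem?_eq_getElem hi0, hzi, hbeq]
      have hminpair : ∀ j c', j < i0 → ¬ goodAt l j c' := by
        intro j c' hj hg
        have hz := (goodAt_iff_zip l j c').1 hg
        have hjlt : j < (l.zip l.tail).length := by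
          by_contra h
          rw [List.getElem?_eq_none (le_of_not_gt h)] at hz
          simpa using hz.1
        have := hprev j hj
        have hje : (l.zip l.tail)[j] = (c', c') := by
          have := hz.1
          rwa [List.getElem?_eq_getElem hjlt, Option.some_inj] at this
        rw [hje] at this
        simp [qPair, hz.2] at this
      -- find l [c0,c0] = i0
      have hfc0 : PySem.Chars.find l [c0, c0] = (i0 : Int) := by
        have hne : PySem.Chars.find l [c0, c0] ≠ -1 := by
          rw [PySem.Chars.find_ne_neg_one_iff, ← PySem.Chars.isIn_iff_infix,
            ← PySem.Chars.exists_prefix_drop_iff_isIn]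
          exact ⟨i0, (double_prefix_drop_iff l i0 c0).2 ⟨hgood.1, hgood.2.1⟩⟩
        have hge : -1 ≤ PySem.Chars.find l [c0, c0] := PySem.Chars.neg_one_le_find l [c0, c0]
        have hpos : 0 ≤ PySem.Chars.find l [c0, c0] := by omega
        rcases PySem.Chars.find_spec hpos with ⟨hpre, hmin⟩
        set j1 := (PySem.Chars.find l [c0, c0]).toNat with hj1
        have hg1 : goodAt l j1 c0 := by
          rcases (double_prefix_drop_iff l j1 c0).1 hpre with ⟨h1, h2⟩
          exact ⟨h1, h2, hb.2⟩
        have hle1 : i0 ≤ j1 := by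
          by_contra h
          exact hminpair j1 c0 (lt_of_not_ge h) hg1
        have hle2 : j1 ≤ i0 := by
          by_contra h
          exact hmin i0 (lt_of_not_ge h)
            ((double_prefix_drop_iff l i0 c0).2 ⟨hgood.1, hgood.2.1⟩)
        omega
      have hq0 : Qc l c0 := (Qc_iff l c0).2 ⟨hb.2, i0, hgood⟩
      rcases hinv with ⟨_, hall⟩ | ⟨c, he, _, hq, hmin⟩
      · exact absurd hq0 (hall c0 ((PySem.Set.mem_ofList _ _).2 (List.mem_of_getElem? hgood.1)))
      · -- the winner c must be c0
        have hgec : -1 ≤ PySem.Chars.find l [c, c] := PySem.Chars.neg_one_le_find l [c, c]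
        have hposc : 0 ≤ PySem.Chars.find l [c, c] := by
          have := hq.2; omega
        have hlei : PySem.Chars.find l [c, c] ≤ (i0 : Int) := by
          rw [← hfc0]
          exact hmin c0 ((PySem.Set.mem_ofList _ _).2 (List.mem_of_getElem? hgood.1)) hq0
        rcases PySem.Chars.find_spec hposc with ⟨hpre, _⟩
        set j := (PySem.Chars.find l [c, c]).toNat with hj
        have hgj : goodAt l j c := by
          rcases (double_prefix_drop_iff l j c).1 hpre with ⟨h1, h2⟩
          exact ⟨h1, h2, hq.1⟩
        have hjle : j ≤ i0 := by omega
        have hjeq : j = i0 := by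
          by_contra h
          exact hminpair j c (by omega) hgj
        have hceq : c = c0 := by
          have h1 := hgj.1
          rw [hjeq] at h1
          have h2 := hgood.1
          rw [h1] at h2
          exact Option.some_inj.1 h2
        rw [hA, hF, he, hceq]
        rfl

-- ===== VERDICT =====
theorem buscar_rr_spec : Claim_equal_buscar_rr := by
  intro txt _
  exact buscar_rr_eq txt
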